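-- pv_equiv track=rewrite | github.com/bordenchen/pbnn | bpnn/aqi_hourly_bpnn.py | SelectVariable
-- ===== SOURCE A (Python) =====
-- def SelectVariable(dataframe,station,item):
--     df_col = list(dataframe)
--     select_station_col = []
--     for station in stations:
--         for col in df_col:
--             if station in col:
--                 select_station_col.append(col)
--     select_col=[]
--     for item in items:
--         for col in select_station_col:
--             if item in col:
--                 select_col.append(col)
--     return(select_col)
--
-- stations = ['chaozhou','meinong','dialiao']
--
-- items = ['AMB_TEMP','RAINFALL','RH','WIND_SPEED','WIND_DIREC','PM10']
-- ===== SOURCE B (Python) =====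
-- stations = ['chaozhou','meinong','dialiao']
--
-- items = ['AMB_TEMP','RAINFALL','RH','WIND_SPEED','WIND_DIREC','PM10']
--
-- def SelectVariable(dataframe, station, item):
--     # One triple comprehension instead of two sequential filtering passes;
--     # item-major, then station-major, then column order, as A emits them.
--     return [col for item in items for station in stations
--             for col in dataframe if station in col and item in col]
-- ===== Notes on version B (the rewrite author's own statement) =====
-- stated objective: simpler
-- what changed: Replaces A's two sequential append passes with an intermediate station-filtered list by a single triple nested comprehension over items, stations and columns, with no intermediate list.
import Mathlib
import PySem

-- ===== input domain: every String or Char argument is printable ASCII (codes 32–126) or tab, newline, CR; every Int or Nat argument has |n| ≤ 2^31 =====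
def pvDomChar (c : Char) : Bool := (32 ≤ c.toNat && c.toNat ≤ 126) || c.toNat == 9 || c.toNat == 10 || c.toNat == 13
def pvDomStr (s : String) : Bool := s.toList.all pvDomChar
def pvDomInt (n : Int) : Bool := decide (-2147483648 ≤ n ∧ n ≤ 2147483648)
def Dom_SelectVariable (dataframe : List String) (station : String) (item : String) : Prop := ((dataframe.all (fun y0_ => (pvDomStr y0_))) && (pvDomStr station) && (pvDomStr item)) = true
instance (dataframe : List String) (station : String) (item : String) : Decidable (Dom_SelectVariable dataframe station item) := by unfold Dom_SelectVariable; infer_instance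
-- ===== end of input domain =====

-- B replaces A's two sequential append passes (with an intermediate station-filtered
-- list) by one triple nested comprehension; same result, simpler decomposition.
-- The module constants `stations` and `items` of the Python file:
def pvStations : List String := ["chaozhou", "meinong", "dialiao"]
def pvItems : List String := ["AMB_TEMP", "RAINFALL", "RH", "WIND_SPEED", "WIND_DIREC", "PM10"]

-- ===== PORT A =====
def SelectVariable (dataframe : List String) (station : String) (item : String) : List String :=
  let df_col := dataframe
  let select_station_col :=
    pvStations.foldl (fun acc station =>
      df_col.foldl (fun acc col =>
        if PySem.Str.isIn station col then acc ++ [col] else acc) acc) []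
  let select_col :=
    pvItems.foldl (fun acc item =>
      select_station_col.foldl (fun acc col =>
        if PySem.Str.isIn item col then acc ++ [col] else acc) acc) []
  select_col

-- ===== PORT B =====
def SelectVariable_alt (dataframe : List String) (station : String) (item : String) : List String :=
  pvItems.flatMap (fun item =>
    pvStations.flatMap (fun station =>
      dataframe.filter (fun col =>
        PySem.Str.isIn station col && PySem.Str.isIn item col)))

-- ===== PRECONDITION & SPEC =====
def Spec_SelectVariable (dataframe : List String) (station : String) (item : String) (out : List String) : Prop := out = SelectVariable_alt dataframe station item
instance (dataframe : List String) (station : String) (item : String) (out : List String) : Decidable (Spec_SelectVariable dataframe station item out) := by unfold Spec_SelectVariable; infer_instance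

-- ===== CLAIM (what is proved, stated in full; the proofs are below) =====
def Claim_equal_SelectVariable : Prop := ∀ (dataframe : List String) (station : String) (item : String), Dom_SelectVariable dataframe station item → Spec_SelectVariable dataframe station item (SelectVariable dataframe station item)

-- ===== LEMMAS AND PROOFS =====

-- A's "for x in l: for col in df: if p x col: acc.append(col)" equals acc ++ concat of filters.
theorem pv_foldl_filter_pass {α β : Type} (l : List α) (df : List β) (p : α → β → Bool)
    (acc : List β) :
    l.foldl (fun acc x =>
      df.foldl (fun acc col => if p x col then acc ++ [col] else acc) acc) acc
      = acc ++ l.flatMap (fun x => df.filter (p x)) := by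
  induction l generalizing acc with
  | nil => simp
  | cons a t ih =>
      rw [List.foldl_cons, PySem.List.foldl_append_if_eq_filter, ih, List.flatMap_cons,
        List.append_assoc]

-- Fully general form of the equivalence (arbitrary station/item lists).
theorem pv_general (its sts df : List String) :
    (let S := sts.foldl (fun acc st =>
        df.foldl (fun a c => if PySem.Str.isIn st c then a ++ [c] else a) acc) []
     its.foldl (fun acc it =>
        S.foldl (fun a c => if PySem.Str.isIn it c then a ++ [c] else a) acc) [])
    = its.flatMap (fun it => sts.flatMap (fun st =>
        df.filter (fun c => PySem.Str.isIn st c && PySem.Str.isIn it c))) := by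
  simp only [pv_foldl_filter_pass, List.nil_append, List.filter_flatMap, List.filter_filter]
  refine List.flatMap_congr (fun it _ => List.flatMap_congr (fun st _ => ?_))
  exact List.filter_congr (fun c _ => by rw [Bool.and_comm])

-- ===== VERDICT (by name: the statement is the Claim_ definition above) =====
theorem SelectVariable_spec : Claim_equal_SelectVariable :=
  fun dataframe _ _ _ => (pv_general pvItems pvStations dataframe).symm.symm
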